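-- pv_equiv track=rewrite | github.com/tind/marc-json-schema | generate.py | sort_field_map
-- ===== SOURCE A (Python) =====
-- def sort_field_map(d, reverse=False):
--     index = 1 if reverse else 0
--
--     def can_be_int(d):
--         try:
--             int(d)
--             return True
--         except (ValueError, TypeError):
--             return False
--     return sorted([(key, value) for key, value in d.items()], key=lambda item: (can_be_int(item[index]), item[index]))
-- ===== SOURCE B (Python) =====
-- def sort_field_map(d, reverse=False):
--     index = 1 if reverse else 0
--
--     def can_be_int(x):
--         try:
--             int(x)
--             return True
--         except (ValueError, TypeError):
--             return False
--
--     items = list(d.items())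
--     non_ints = [it for it in items if not can_be_int(it[index])]
--     ints = [it for it in items if can_be_int(it[index])]
--     non_ints.sort(key=lambda it: it[index])
--     ints.sort(key=lambda it: it[index])
--     return non_ints + ints
-- ===== Notes on version B (the rewrite author's own statement) =====
-- stated objective: alternative
-- what changed: Replaces A's single composite-key sort ((is_int, raw)) by a one-pass partition into int-coercible and other items followed by two independent stable sorts on the raw selected field, concatenated non-ints first.
import Mathlib
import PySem

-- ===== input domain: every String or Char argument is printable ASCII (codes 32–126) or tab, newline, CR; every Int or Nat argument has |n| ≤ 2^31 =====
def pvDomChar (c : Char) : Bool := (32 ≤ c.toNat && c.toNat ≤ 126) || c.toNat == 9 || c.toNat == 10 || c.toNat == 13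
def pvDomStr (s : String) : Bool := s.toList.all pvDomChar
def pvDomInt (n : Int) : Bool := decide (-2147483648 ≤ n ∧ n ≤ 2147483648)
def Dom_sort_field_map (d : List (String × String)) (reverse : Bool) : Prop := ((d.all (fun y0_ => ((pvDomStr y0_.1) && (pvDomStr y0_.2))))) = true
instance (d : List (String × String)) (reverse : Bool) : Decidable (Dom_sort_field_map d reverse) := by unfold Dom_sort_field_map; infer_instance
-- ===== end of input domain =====

-- B replaces A's single composite-key sort by a partition into int-coercible / other items
-- followed by two independent stable sorts on the raw selected field (objective: alternative).


-- ===== PORT A =====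
-- can_be_int(x): int(x) succeeds (x is a str here; TypeError cannot occur)
def pvCanBeInt (s : String) : Bool := (PySem.Int.ofStr? s).isSome

-- the Lean argument is the dict's pair list; Python receives the dict, so both ports read it through PySem.Dict.ofList
def sort_field_map (d : List (String × String)) (reverse : Bool) : List (String × String) :=
  let index : Int := if reverse then 1 else 0
  -- item[index] on a 2-tuple, ported by hand (index is 0 or 1): exact
  PySem.List.sorted2 (((PySem.Dict.ofList d).items).map (fun kv => (kv.1, kv.2)))
    (fun item => pvCanBeInt (if index == 1 then item.2 else item.1))
    (fun item => (if index == 1 then item.2 else item.1)) false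

-- ===== PORT B =====
def sort_field_map_alt (d : List (String × String)) (reverse : Bool) : List (String × String) :=
  let index : Int := if reverse then 1 else 0
  let pick : String × String → String := fun it => if index == 1 then it.2 else it.1
  let items := (PySem.Dict.ofList d).items
  let nonInts := items.filter (fun it => !pvCanBeInt (pick it))
  let ints := items.filter (fun it => pvCanBeInt (pick it))
  PySem.List.sorted nonInts pick false ++ PySem.List.sorted ints pick false

-- ===== PRECONDITION & SPEC =====
def Spec_sort_field_map (d : List (String × String)) (reverse : Bool) (out : List (String × String)) : Prop := out = sort_field_map_alt d reverse
instance (d : List (String × String)) (reverse : Bool) (out : List (String × String)) : Decidable (Spec_sort_field_map d reverse out) := by unfold Spec_sort_field_map; infer_instance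

-- ===== CLAIM (what is proved, stated in full; the proofs are below) =====
def Claim_equal_sort_field_map : Prop := ∀ (d : List (String × String)) (reverse : Bool), Dom_sort_field_map d reverse → Spec_sort_field_map d reverse (sort_field_map d reverse)

-- ===== LEMMAS AND PROOFS =====

-- insertBy walks past a prefix none of whose elements trigger `before`
theorem pv_insertBy_skip {α : Type} (before : α → α → Bool) (x : α) (accF rest : List α)
    (h : ∀ y ∈ accF, before x y = false) :
    PySem.List.insertBy before x (accF ++ rest) = accF ++ PySem.List.insertBy before x rest := by
  induction accF with
  | nil => simp
  | cons a as ih =>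
      simp only [List.cons_append, PySem.List.insertBy]
      rw [h a (by simp)]
      simp only [Bool.false_eq_true, if_false]
      rw [ih (fun y hy => h y (by simp [hy]))]

-- if every element of the suffix triggers `before`, x lands inside the prefix part
theorem pv_insertBy_front {α : Type} (before : α → α → Bool) (x : α) (accF rest : List α)
    (h : ∀ y ∈ rest, before x y = true) :
    PySem.List.insertBy before x (accF ++ rest) = PySem.List.insertBy before x accF ++ rest := by
  induction accF with
  | nil =>
      cases rest with
      | nil => simp
      | cons r rs =>
          simp only [List.nil_append, PySem.List.insertBy]
          rw [h r (by simp)]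
          simp
  | cons a as ih =>
      simp only [List.cons_append, PySem.List.insertBy]
      by_cases hxa : before x a = true
      · rw [hxa]; simp
      · rw [Bool.not_eq_true] at hxa
        rw [hxa]
        simp only [Bool.false_eq_true, if_false, List.cons_append]
        rw [ih]

-- insertBy only looks at `before x ·` on the list's elements
theorem pv_insertBy_congr {α : Type} (b₁ b₂ : α → α → Bool) (x : α) (l : List α)
    (h : ∀ y ∈ l, b₁ x y = b₂ x y) :
    PySem.List.insertBy b₁ x l = PySem.List.insertBy b₂ x l := by
  induction l with
  | nil => rfl
  | cons a as ih =>
      simp only [PySem.List.insertBy]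
      rw [h a (by simp)]
      by_cases hxa : b₂ x a = true
      · rw [hxa]; simp
      · rw [Bool.not_eq_true] at hxa
        rw [hxa]
        simp only [Bool.false_eq_true, if_false]
        rw [ih (fun y hy => h y (by simp [hy]))]

-- one insertion step of the composite (p, k) order into a partitioned accumulator
theorem pv_insert_partition {α κ : Type} [LT κ] [DecidableLT κ]
    (p : α → Bool) (k : α → κ) (x : α) (accF accT : List α)
    (hF : ∀ y ∈ accF, p y = false) (hT : ∀ y ∈ accT, p y = true) :
    PySem.List.insertBy (fun a b => decide (p a < p b) || !decide (p b < p a) && decide (k a < k b)) x (accF ++ accT)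
      = if p x then accF ++ PySem.List.insertBy (fun a b => decide (k a < k b)) x accT
        else PySem.List.insertBy (fun a b => decide (k a < k b)) x accF ++ accT := by
  by_cases hx : p x = true
  · rw [hx, if_pos rfl]
    rw [pv_insertBy_skip _ x accF accT (fun y hy => by simp [hF y hy, hx])]
    rw [pv_insertBy_congr _ (fun a b => decide (k a < k b)) x accT
      (fun y hy => by simp [hT y hy, hx])]
  · rw [Bool.not_eq_true] at hx
    rw [hx]
    simp only [Bool.false_eq_true, if_false]
    rw [pv_insertBy_front _ x accF accT (fun y hy => by simp [hT y hy, hx])]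
    rw [pv_insertBy_congr _ (fun a b => decide (k a < k b)) x accF
      (fun y hy => by simp [hF y hy, hx])]

-- the whole stable insertion-sort fold, partitioned
theorem pv_fold_partition {α κ : Type} [LT κ] [DecidableLT κ]
    (p : α → Bool) (k : α → κ) (xs accF accT : List α)
    (hF : ∀ y ∈ accF, p y = false) (hT : ∀ y ∈ accT, p y = true) :
    xs.foldl (fun acc x => PySem.List.insertBy (fun a b => decide (p a < p b) || !decide (p b < p a) && decide (k a < k b)) x acc) (accF ++ accT)
      = (xs.filter (fun x => !p x)).foldl (fun acc x => PySem.List.insertBy (fun a b => decide (k a < k b)) x acc) accF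
        ++ (xs.filter p).foldl (fun acc x => PySem.List.insertBy (fun a b => decide (k a < k b)) x acc) accT := by
  induction xs generalizing accF accT with
  | nil => simp
  | cons x xs ih =>
      simp only [List.foldl_cons, List.filter_cons]
      rw [pv_insert_partition p k x accF accT hF hT]
      by_cases hx : p x = true
      · rw [hx, if_pos rfl]
        simp only [Bool.not_true, Bool.false_eq_true, if_false]
        rw [ih accF _ hF (fun y hy => by
          rcases (PySem.List.mem_insertBy _ _ _ _).1 hy with h | h
          · exact h ▸ hx
          · exact hT y h)]
        simp
      · rw [Bool.not_eq_true] at hx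
        rw [hx]
        simp only [Bool.false_eq_true, if_false, Bool.not_false]
        rw [ih _ accT (fun y hy => by
          rcases (PySem.List.mem_insertBy _ _ _ _).1 hy with h | h
          · exact h ▸ hx
          · exact hF y h) hT]
        simp

-- a composite-key stable sort with a Bool first component is partition + two stable sorts
theorem pv_sorted2_bool_split {α κ : Type} [LT κ] [DecidableLT κ]
    (xs : List α) (p : α → Bool) (k : α → κ) :
    PySem.List.sorted2 xs (fun x => p x) k false
      = PySem.List.sorted (xs.filter (fun x => !p x)) k false
        ++ PySem.List.sorted (xs.filter p) k false := by
  simp only [PySem.List.sorted2, PySem.List.sorted, if_neg (by decide : ¬ (false = true))]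
  exact pv_fold_partition p k xs [] [] (by simp) (by simp)

-- ===== VERDICT (by name: the statement is the Claim_ definition above) =====
theorem sort_field_map_spec : Claim_equal_sort_field_map := by
  intro d reverse _
  show sort_field_map d reverse = sort_field_map_alt d reverse
  unfold sort_field_map sort_field_map_alt
  cases reverse <;>
    simp only [Bool.false_eq_true, if_true, if_false, beq_iff_eq, List.map_id_fun', id_eq,
      Int.reduceEq] <;>
    exact pv_sorted2_bool_split _ _ _
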